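-- pv_equiv track=rewrite | github.com/Jean-Massumi/SO_UEM | atividade_03/alocacao.py | encontrarBlocosLivres
-- ===== SOURCE A (Python) =====
-- def encontrarBlocosLivres(memoria):
--     blocosLivres = []
--     i = 0
--
--     while i < len(memoria):
--         if memoria[i] == 0:
--             inicio = i
--
--             while i < len(memoria) and memoria[i] == 0:
--                 i += 1
--
--             blocosLivres.append((inicio, i - inicio))
--             # Tupla: 1º valor: indice do bloco livre, 2º valor: tamanho do bloco livre
--
--         else:
--             i += 1
--
--     return blocosLivres
-- ===== SOURCE B (Python) =====
-- def encontrarBlocosLivres(memoria):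
--     # grouping pass: consume one maximal run of equal zeroness per step
--     blocos = []
--     idx = 0
--     resto = memoria
--     while resto:
--         zero = resto[0] == 0
--         run = next((k for k, y in enumerate(resto) if (y == 0) != zero), len(resto))
--         if zero:
--             blocos.append((idx, run))
--         idx += run
--         resto = resto[run:]
--     return blocos
-- ===== Notes on version B (the rewrite author's own statement) =====
-- stated objective: alternative
-- what changed: Replaces A's index-driven outer loop with a nested zero-scanning while by a run-length grouping pass that consumes one maximal run of equal zeroness (groupby-style) per step and slices it off the remaining list.
import Mathlib
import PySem

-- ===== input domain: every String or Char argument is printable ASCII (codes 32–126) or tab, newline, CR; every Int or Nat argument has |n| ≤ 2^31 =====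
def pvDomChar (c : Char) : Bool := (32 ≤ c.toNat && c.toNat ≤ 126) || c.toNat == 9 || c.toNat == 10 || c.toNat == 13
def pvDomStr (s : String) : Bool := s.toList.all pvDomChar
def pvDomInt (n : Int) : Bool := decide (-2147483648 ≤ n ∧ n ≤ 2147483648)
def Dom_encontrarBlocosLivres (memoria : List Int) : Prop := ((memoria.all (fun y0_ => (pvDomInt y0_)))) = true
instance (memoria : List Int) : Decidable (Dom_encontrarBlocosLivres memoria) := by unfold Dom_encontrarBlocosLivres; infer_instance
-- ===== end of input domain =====

-- B replaces A's index-driven loop with nested zero-scan by a groupby-style pass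
-- consuming one maximal run of equal zeroness per step (alternative decomposition, same cost).


-- ===== PORT A =====
-- inner 'while i < len(memoria) and memoria[i] == 0: i += 1'
def skipZeros (m : List Int) (i : Nat) : Nat :=
  if i < m.length ∧ m.getD i 1 = 0 then skipZeros m (i + 1) else i
termination_by m.length - i
decreasing_by omega

theorem skipZeros_ge (m : List Int) (i : Nat) : i ≤ skipZeros m i := by
  fun_induction skipZeros with
  | case1 i h ih => omega
  | case2 i h => omega

-- outer 'while i < len(memoria)'
def loopA (m : List Int) (i : Nat) : List (Int × Int) :=
  if i < m.length then
    if m.getD i 1 = 0 then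
      ((i : Int), (skipZeros m i : Int) - (i : Int)) :: loopA m (skipZeros m i)
    else
      loopA m (i + 1)
  else []
termination_by m.length - i
decreasing_by
  · have h1 : skipZeros m i = skipZeros m (i + 1) := by
      rw [skipZeros]; simp_all
    have h2 := skipZeros_ge m (i + 1)
    omega
  · omega

def encontrarBlocosLivres (memoria : List Int) : List (Int × Int) := loopA memoria 0

-- ===== PORT B =====
-- port of 'next((k for k, y in enumerate(resto) if (y == 0) != zero), len(resto))'
def mismatchIdx (zero : Bool) (xs : List Int) : Nat :=
  match xs with
  | [] => 0
  | y :: t => if (decide (y = 0)) != zero then 0 else 1 + mismatchIdx zero t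

theorem mismatchIdx_head (x : Int) (t : List Int) :
    mismatchIdx (decide (x = 0)) (x :: t) = 1 + mismatchIdx (decide (x = 0)) t := by
  simp [mismatchIdx]

-- the 'while resto:' loop of B, as recursion on the remaining list
def loopB (resto : List Int) (idx : Int) : List (Int × Int) :=
  match resto with
  | [] => []
  | x :: t =>
    let zero := decide (x = 0)
    let run := mismatchIdx zero (x :: t)
    let rest := loopB ((x :: t).drop run) (idx + run)
    if zero then (idx, (run : Int)) :: rest else rest
termination_by resto.length
decreasing_by
  have := mismatchIdx_head x t
  simp_all

def encontrarBlocosLivres_alt (memoria : List Int) : List (Int × Int) := loopB memoria 0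

-- ===== PRECONDITION & SPEC =====
def Spec_encontrarBlocosLivres (memoria : List Int) (out : List (Int × Int)) : Prop := out = encontrarBlocosLivres_alt memoria
instance (memoria : List Int) (out : List (Int × Int)) : Decidable (Spec_encontrarBlocosLivres memoria out) := by unfold Spec_encontrarBlocosLivres; infer_instance

-- ===== CLAIM (what is proved, stated in full; the proofs are below) =====
def Claim_equal_encontrarBlocosLivres : Prop := ∀ (memoria : List Int), Dom_encontrarBlocosLivres memoria → Spec_encontrarBlocosLivres memoria (encontrarBlocosLivres memoria)

-- ===== LEMMAS AND PROOFS =====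

theorem drop_cons_getD (m : List Int) (i : Nat) (h : i < m.length) :
    m.drop i = m.getD i 1 :: m.drop (i + 1) := by
  rw [List.getD_eq_getElem?_getD, List.getElem?_eq_getElem h]
  exact List.drop_eq_getElem_cons h

-- 'skip over nonzeros' helper (proof-only): the index the outer loop reaches by +1 steps
def skipNZ (m : List Int) (i : Nat) : Nat :=
  if i < m.length ∧ m.getD i 1 ≠ 0 then skipNZ m (i + 1) else i
termination_by m.length - i
decreasing_by omega

theorem skipNZ_ge (m : List Int) (i : Nat) : i ≤ skipNZ m i := by
  fun_induction skipNZ with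
  | case1 i h ih => omega
  | case2 i h => omega

theorem mismatch_true_eq_skipZeros (m : List Int) (i : Nat) :
    i + mismatchIdx true (m.drop i) = skipZeros m i := by
  fun_induction skipZeros with
  | case1 i h ih =>
    rw [drop_cons_getD m i h.1, mismatchIdx,
      if_neg (by have := h.2; simp_all [List.getD_eq_getElem?_getD])]
    omega
  | case2 i h =>
    rcases Nat.lt_or_ge i m.length with hi | hi
    · have h2 : m.getD i 1 ≠ 0 := by tauto
      rw [drop_cons_getD m i hi, mismatchIdx,
        if_pos (by simp_all [List.getD_eq_getElem?_getD])]
      omega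
    · rw [List.drop_eq_nil_of_le hi, mismatchIdx]
      omega

theorem mismatch_false_eq_skipNZ (m : List Int) (i : Nat) :
    i + mismatchIdx false (m.drop i) = skipNZ m i := by
  fun_induction skipNZ with
  | case1 i h ih =>
    rw [drop_cons_getD m i h.1, mismatchIdx,
      if_neg (by have := h.2; simp_all [List.getD_eq_getElem?_getD])]
    omega
  | case2 i h =>
    rcases Nat.lt_or_ge i m.length with hi | hi
    · have h2 : m.getD i 1 = 0 := by by_contra hc; exact h ⟨hi, hc⟩
      rw [drop_cons_getD m i hi, mismatchIdx,
        if_pos (by simp_all [List.getD_eq_getElem?_getD])]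
      omega
    · rw [List.drop_eq_nil_of_le hi, mismatchIdx]
      omega

theorem loopB_stepNZ (m : List Int) (i : Nat) (hlt : i < m.length) (hz : m.getD i 1 ≠ 0) :
    loopB (m.drop i) (i : Int) = loopB (m.drop (skipNZ m i)) ((skipNZ m i : Nat) : Int) := by
  have hge := skipNZ_ge m i
  have hmm := mismatch_false_eq_skipNZ m i
  have hkey : decide (m.getD i 1 = 0) = false := by
    simp only [decide_eq_false_iff_not]; exact hz
  rw [drop_cons_getD m i hlt, loopB]
  simp only [hkey]
  rw [if_neg Bool.false_ne_true]
  have hrun : mismatchIdx false (m.getD i 1 :: m.drop (i + 1)) = skipNZ m i - i := by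
    rw [← drop_cons_getD m i hlt]; omega
  rw [hrun]
  have hdrop : (m.getD i 1 :: m.drop (i + 1)).drop (skipNZ m i - i)
      = m.drop (skipNZ m i) := by
    rw [← drop_cons_getD m i hlt, List.drop_drop]; congr 1; omega
  rw [hdrop]
  have e : (i : Int) + ((skipNZ m i - i : Nat) : Int) = ((skipNZ m i : Nat) : Int) := by omega
  rw [e]

theorem loopA_eq_loopB (m : List Int) (i : Nat) :
    loopA m i = loopB (m.drop i) (i : Int) := by
  fun_induction loopA with
  | case1 i hlt hz ih =>
    -- zero run at i
    have hge := skipZeros_ge m i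
    have hmm := mismatch_true_eq_skipZeros m i
    have hkey : decide (m.getD i 1 = 0) = true := by
      simp only [decide_eq_true_eq]; exact hz
    rw [drop_cons_getD m i hlt, loopB]
    simp only [hkey]
    rw [if_pos trivial]
    have hrun : mismatchIdx true (m.getD i 1 :: m.drop (i + 1)) = skipZeros m i - i := by
      rw [← drop_cons_getD m i hlt]; omega
    rw [hrun]
    have hdrop : (m.getD i 1 :: m.drop (i + 1)).drop (skipZeros m i - i)
        = m.drop (skipZeros m i) := by
      rw [← drop_cons_getD m i hlt, List.drop_drop]; congr 1; omega
    rw [hdrop, ih]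
    have e1 : ((skipZeros m i - i : Nat) : Int) = (skipZeros m i : Int) - (i : Int) := by omega
    have e2 : (i : Int) + ((skipZeros m i - i : Nat) : Int) = ((skipZeros m i : Nat) : Int) := by
      omega
    rw [e2, e1]
  | case2 i hlt hz ih =>
    -- nonzero at i: A advances by 1; B consumes the whole nonzero run in one step
    rw [loopB_stepNZ m i hlt hz, ih]
    have hstep : skipNZ m i = skipNZ m (i + 1) := by
      rw [skipNZ]; simp_all
    rw [hstep]
    by_cases h1 : (i + 1) < m.length ∧ m.getD (i + 1) 1 ≠ 0
    · exact loopB_stepNZ m (i + 1) h1.1 h1.2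
    · have : skipNZ m (i + 1) = i + 1 := by rw [skipNZ, if_neg h1]
      rw [this]
  | case3 i h =>
    rw [List.drop_eq_nil_of_le (by omega), loopB]

-- ===== VERDICT (by name: the statement is the Claim_ definition above) =====
theorem encontrarBlocosLivres_spec : Claim_equal_encontrarBlocosLivres := by
  intro m _
  unfold Spec_encontrarBlocosLivres encontrarBlocosLivres encontrarBlocosLivres_alt
  simpa using loopA_eq_loopB m 0
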